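-- pv_equiv track=rewrite | github.com/YunhuaLai/SpecialSoduko | BackEnd/newGame.py | derive_requirements
-- ===== SOURCE A (Python) =====
-- def derive_requirements(board):
--     """
--     Derive row and column requirements based on a given 2D board.
--
--     Args:
--     - board: A 2D list of True, False, and "Undefined" values.
--
--     Returns:
--     - row_requirements: List of requirements for rows.
--     - col_requirements: List of requirements for columns.
--     """
--     def extract_segments(line):
--         segments = []
--         count = 0
--         for cell in line:
--             if cell == True:
--                 count += 1
--             elif count > 0:
--                 segments.append(count)
--                 count = 0
--         if count > 0:
--             segments.append(count)
--         return segments if segments else [0]  # Return [0] if no segments are found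
--
--     row_requirements = [extract_segments(row) for row in board]
--     col_requirements = [
--         extract_segments([board[i][j] for i in range(len(board))])
--         for j in range(len(board[0]))
--     ]
--
--     return row_requirements, col_requirements
-- ===== SOURCE B (Python) =====
-- def derive_requirements(board):
--     # Same results as the original, but column requirements are accumulated
--     # in one top-to-bottom sweep (running per-column counters) instead of
--     # re-extracting each column by index.
--     w = len(board[0])
--     row_requirements = []
--     col_counts = [0] * w
--     col_segs = [[] for _ in range(w)]
--     for row in board:
--         segs = []
--         c = 0
--         for cell in row:
--             if cell == True:
--                 c += 1
--             elif c > 0: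
--                 segs.append(c)
--                 c = 0
--         if c > 0:
--             segs.append(c)
--         row_requirements.append(segs if segs else [0])
--         for j in range(w):
--             if row[j] == True:
--                 col_counts[j] += 1
--             elif col_counts[j] > 0:
--                 col_segs[j].append(col_counts[j])
--                 col_counts[j] = 0
--     col_requirements = []
--     for j in range(w):
--         if col_counts[j] > 0:
--             col_segs[j].append(col_counts[j])
--         col_requirements.append(col_segs[j] if col_segs[j] else [0])
--     return row_requirements, col_requirements
-- ===== Notes on version B (the rewrite author's own statement) =====
-- stated objective: alternative
-- what changed: Column requirements are accumulated with running per-column counters in one top-to-bottom sweep over the rows, instead of materialising each column by indexed re-extraction and running the segment helper on it.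
import Mathlib
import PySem

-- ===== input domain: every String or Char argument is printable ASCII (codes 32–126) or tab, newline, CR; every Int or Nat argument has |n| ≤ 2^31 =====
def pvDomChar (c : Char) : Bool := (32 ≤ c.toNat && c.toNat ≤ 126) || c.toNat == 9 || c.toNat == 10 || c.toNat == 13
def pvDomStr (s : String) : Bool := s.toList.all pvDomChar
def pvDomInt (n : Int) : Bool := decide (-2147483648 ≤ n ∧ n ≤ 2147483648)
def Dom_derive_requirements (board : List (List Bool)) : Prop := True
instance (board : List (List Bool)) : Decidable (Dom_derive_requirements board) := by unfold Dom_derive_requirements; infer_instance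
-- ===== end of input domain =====

-- One honest line: B computes the column requirements by a single top-to-bottom sweep with
-- running per-column counters instead of re-extracting each column by index (alternative decomposition).

-- ===== PORT A =====
-- A's inner helper extract_segments: a counter loop, then flush, then the [0] default.
def extractSegmentsA (line : List Bool) : List Int :=
  let st := line.foldl
    (fun (st : List Int × Int) cell =>
      if cell = true then (st.1, st.2 + 1)
      else if st.2 > 0 then (st.1 ++ [st.2], 0)
      else st)
    ([], 0)
  let segments := if st.2 > 0 then st.1 ++ [st.2] else st.1
  if segments = [] then [0] else segments

-- board[i][j] is in range whenever Pre_ holds; ported with getD (Python raises out of range).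
def derive_requirements (board : List (List Bool)) : List (List Int) × List (List Int) :=
  let row_requirements := board.map extractSegmentsA
  let col_requirements := (List.range (board.headD []).length).map
    (fun j => extractSegmentsA (board.map (fun row => row.getD j false)))
  (row_requirements, col_requirements)

-- ===== PORT B =====
-- B's per-row segment loop (same small counter loop as in Source B's row part).
def extractSegmentsB (line : List Bool) : List Int :=
  let st := line.foldl
    (fun (st : List Int × Int) cell =>
      if cell = true then (st.1, st.2 + 1)
      else if st.2 > 0 then (st.1 ++ [st.2], 0)
      else st)
    ([], 0)
  let segs := if st.2 > 0 then st.1 ++ [st.2] else st.1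
  if segs = [] then [0] else segs

-- One row of the sweep: update each column's (segments, running count) pair from row[j].
-- The parallel Python arrays col_segs / col_counts are represented as a list of pairs.
def sweepRow (st : List (List Int × Int)) (row : List Bool) : List (List Int × Int) :=
  st.zipIdx.map (fun p =>
    let cell := row.getD p.2 false
    if cell = true then (p.1.1, p.1.2 + 1)
    else if p.1.2 > 0 then (p.1.1 ++ [p.1.2], 0)
    else p.1)

def derive_requirements_alt (board : List (List Bool)) : List (List Int) × List (List Int) :=
  let w := (board.headD []).length
  let final := board.foldl
    (fun (acc : List (List Int) × List (List Int × Int)) row =>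
      (acc.1 ++ [extractSegmentsB row], sweepRow acc.2 row))
    ([], List.replicate w ([], 0))
  let col_requirements := final.2.map (fun p =>
    let segs := if p.2 > 0 then p.1 ++ [p.2] else p.1
    if segs = [] then [0] else segs)
  (final.1, col_requirements)

-- ===== PRECONDITION & SPEC =====
-- Pre_ excludes exactly the inputs where Python A raises IndexError: the empty board
-- (board[0]) and ragged boards with a row shorter than row 0 (board[i][j]).
def Pre_derive_requirements (board : List (List Bool)) : Prop :=
  board ≠ [] ∧ ∀ row ∈ board, (board.headD []).length ≤ row.length
instance (board : List (List Bool)) : Decidable (Pre_derive_requirements board) := by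
  unfold Pre_derive_requirements; infer_instance
def pvWitness_derive_requirements : List (List Bool) :=
  [[true, false, true], [true, true, false]]

def Spec_derive_requirements (board : List (List Bool)) (out : List (List Int) × List (List Int)) : Prop := out = derive_requirements_alt board
instance (board : List (List Bool)) (out : List (List Int) × List (List Int)) : Decidable (Spec_derive_requirements board out) := by unfold Spec_derive_requirements; infer_instance

-- ===== CLAIM (what is proved, stated in full; the proofs are below) =====
def Claim_equal_derive_requirements : Prop := ∀ (board : List (List Bool)), Dom_derive_requirements board → Pre_derive_requirements board → Spec_derive_requirements board (derive_requirements board)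

-- ===== LEMMAS AND PROOFS =====

theorem extractSegments_AB (line : List Bool) : extractSegmentsA line = extractSegmentsB line := rfl

-- the per-cell column update B applies at column j
def cellUpd (p : List Int × Int) (cell : Bool) : List Int × Int :=
  if cell = true then (p.1, p.2 + 1)
  else if p.2 > 0 then (p.1 ++ [p.2], 0)
  else p

theorem sweepRow_length (st : List (List Int × Int)) (row : List Bool) :
    (sweepRow st row).length = st.length := by
  simp [sweepRow]

theorem sweepRow_getElem (st : List (List Int × Int)) (row : List Bool) (j : Nat)
    (h : j < st.length) :
    (sweepRow st row)[j]'(by simpa [sweepRow_length] using h) =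
      cellUpd st[j] (row.getD j false) := by
  simp [sweepRow, cellUpd]

theorem foldl_sweepRow_length (rows : List (List Bool)) (st : List (List Int × Int)) :
    (rows.foldl sweepRow st).length = st.length := by
  induction rows generalizing st with
  | nil => rfl
  | cons r rs ih => simp [List.foldl_cons, ih, sweepRow_length]

theorem foldl_sweepRow_getElem (rows : List (List Bool)) (st : List (List Int × Int))
    (j : Nat) (h : j < st.length) :
    (rows.foldl sweepRow st)[j]'(by simpa [foldl_sweepRow_length] using h) =
      rows.foldl (fun p row => cellUpd p (row.getD j false)) st[j] := by
  induction rows generalizing st with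
  | nil => rfl
  | cons r rs ih =>
      simp only [List.foldl_cons]
      rw [ih (sweepRow st r) (by simpa [sweepRow_length] using h),
        sweepRow_getElem st r j h]

theorem foldl_big (rows : List (List Bool)) (acc : List (List Int))
    (st : List (List Int × Int)) :
    rows.foldl
      (fun (acc : List (List Int) × List (List Int × Int)) row =>
        (acc.1 ++ [extractSegmentsB row], sweepRow acc.2 row)) (acc, st) =
      (acc ++ rows.map extractSegmentsB, rows.foldl sweepRow st) := by
  induction rows generalizing acc st with
  | nil => simp
  | cons r rs ih => simp [List.foldl_cons, ih]

theorem extractSegments_eq_fold (line : List Bool) :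
    extractSegmentsA line =
      (let p := line.foldl cellUpd ([], 0)
       let segs := if p.2 > 0 then p.1 ++ [p.2] else p.1
       if segs = [] then [0] else segs) := rfl

-- ===== VERDICT (by name: the statement is the Claim_ definition above) =====
theorem derive_requirements_spec : Claim_equal_derive_requirements := by
  intro board _ _
  show derive_requirements board = derive_requirements_alt board
  unfold derive_requirements derive_requirements_alt
  dsimp only
  rw [foldl_big]
  dsimp only
  refine Prod.ext (by simp [extractSegments_AB]) ?_
  apply List.ext_getElem
  · simp [foldl_sweepRow_length]
  · intro j h1 h2
    have hw : j < (board.headD []).length := by simpa using h1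
    rw [List.getElem_map, List.getElem_map, List.getElem_range,
      foldl_sweepRow_getElem board _ j (by simpa using hw),
      List.getElem_replicate, extractSegments_eq_fold]
    dsimp only
    rw [List.foldl_map]
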